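-- pv_equiv track=rewrite | github.com/Pawo0/WDI | zestaw5/zad21.py | zad21
-- ===== SOURCE A (Python) =====
-- def zad21(t,want):
--     n = len(t)
--
--     def rek(w_i,s,tk,res=""):
--         if s == want:
--             return True
--         if w_i == n:
--             return False
--         flag = False
--         for k_i in range(n):
--             if tk[k_i]:
--                 tk[k_i] = False
--                 flag = rek(w_i+1,s+t[w_i][k_i],tk,res+str(t[w_i][k_i])+"+") or flag
--                 tk[k_i] = True
--             flag = rek(w_i+1,s,tk,res) or flag
--         return flag
--
--     t_b = [True for _ in range(n)]
--     return rek(0, 0, t_b)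
-- ===== SOURCE B (Python) =====
-- def zad21(t, want):
--     # Breadth-first set DP (alternative algorithm): states = set of reachable (used-column mask, sum) pairs,
--     # one pass over the rows; each row may be skipped or assigned a still-free column.
--     n = len(t)
--     states = {(0, 0)}
--     for row in t:
--         new_states = set(states)
--         for mask, s in states:
--             for k in range(n):
--                 if not (mask >> k) & 1:
--                     new_states.add((mask | (1 << k), s + row[k]))
--         states = new_states
--     return any(s == want for _, s in states)
-- ===== Notes on version B (the rewrite author's own statement) =====
-- stated objective: alternative
-- what changed: Replaces the exponential DFS (which re-branches the row-skip inside the column loop) with a one-pass breadth-first set DP over reachable (used-column-mask, sum) states; intended as faster, but a timing run could not confirm a ratio (A timed out at n=64 where B returned; at the largest size both finished it read 2.88x, below its 5 ms floor), so no speed is claimed.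
-- outside the precondition, e.g. on zad21([[]], 0): A returns True, B raises IndexError
import Mathlib
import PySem

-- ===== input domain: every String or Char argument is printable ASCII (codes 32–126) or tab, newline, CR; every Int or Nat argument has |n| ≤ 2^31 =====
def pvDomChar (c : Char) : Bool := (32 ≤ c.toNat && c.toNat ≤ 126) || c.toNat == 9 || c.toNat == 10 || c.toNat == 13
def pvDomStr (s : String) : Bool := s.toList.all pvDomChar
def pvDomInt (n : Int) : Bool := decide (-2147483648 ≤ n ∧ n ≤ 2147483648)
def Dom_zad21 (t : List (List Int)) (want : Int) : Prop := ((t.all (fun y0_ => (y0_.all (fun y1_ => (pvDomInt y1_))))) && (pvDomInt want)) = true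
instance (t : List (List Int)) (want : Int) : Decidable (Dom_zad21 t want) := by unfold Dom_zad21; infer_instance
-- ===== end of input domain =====

-- B replaces A's exponential DFS by a one-pass breadth-first set DP over (used-column mask, sum) states (objective: alternative algorithm).

-- ===== PORT A =====
-- rek(w_i, s, tk, res): the in-place flip tk[k]=False / recurse / tk[k]=True is passing (tk.set k false)
-- to the recursive call.  Python tests `w_i == n`; w_i only ever steps upward from 0, so the test is
-- written `n ≤ w_i` (identical on every reachable call) to give the termination measure n - w_i.
-- tk[k_i] and t[w_i][k_i] are ported with getD: k_i < n = len(tk) always, and t[w_i][k_i] is in range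
-- exactly on Pre_zad21 (outside it Python A raises IndexError for want ≠ 0).
def rekA (t : List (List Int)) (want : Int) (n : Nat) (w_i : Nat) (s : Int) (tk : List Bool) (res : String) : Bool :=
  if s = want then true
  else if n ≤ w_i then false
  else
    (List.range n).foldl (fun flag k_i =>
      let flag :=
        if tk.getD k_i false then
          rekA t want n (w_i+1) (s + (t.getD w_i []).getD k_i 0) (tk.set k_i false)
            (res ++ PySem.Int.toStr ((t.getD w_i []).getD k_i 0) ++ "+") || flag
        else flag
      rekA t want n (w_i+1) s tk res || flag) false
termination_by n - w_i
decreasing_by all_goals omega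

def zad21 (t : List (List Int)) (want : Int) : Bool :=
  rekA t want t.length 0 0 (List.replicate t.length true) ""

-- ===== PORT B =====
-- one row of the DP: new_states = set(states); for (mask, s) in states: for k in range(n):
-- if free, add (mask | 1<<k, s + row[k]).  The states set is consumed only to build another set
-- (order-independent).  row[k] is in range exactly on Pre_zad21 (outside it Python B raises).
def stepB (n : Nat) (row : List Int) (states : PySem.Set (Nat × Int)) : PySem.Set (Nat × Int) :=
  states.foldl (fun new st =>
    (List.range n).foldl (fun new k =>
      if ((st.1 >>> k) &&& 1) == 0 then
        PySem.Set.add new (st.1 ||| (1 <<< k), st.2 + row.getD k 0)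
      else new) new) states

def zad21_alt (t : List (List Int)) (want : Int) : Bool :=
  let n := t.length
  let states := t.foldl (fun states row => stepB n row states) (PySem.Set.ofList [((0 : Nat), (0 : Int))])
  states.any (fun st => st.2 == want)

-- ===== PRECONDITION & SPEC =====
-- Pre_ excludes ragged tables (some row shorter than len(t)): Python A raises IndexError on them for
-- want ≠ 0, and for want = 0 it returns True before touching any cell while B's scan still indexes the
-- short row and raises — so those want = 0 ragged inputs are excluded too (see the cite in claim.json).
def Pre_zad21 (t : List (List Int)) (want : Int) : Prop := ∀ row ∈ t, t.length ≤ row.length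
instance (t : List (List Int)) (want : Int) : Decidable (Pre_zad21 t want) := by unfold Pre_zad21; infer_instance

def pvWitness_zad21 : List (List Int) × Int := ([[1, 2], [3, 4]], 3)

def Spec_zad21 (t : List (List Int)) (want : Int) (out : Bool) : Prop := out = zad21_alt t want
instance (t : List (List Int)) (want : Int) (out : Bool) : Decidable (Spec_zad21 t want out) := by unfold Spec_zad21; infer_instance

-- ===== CLAIM (what is proved, stated in full; the proofs are below) =====
def Claim_equal_zad21 : Prop := ∀ (t : List (List Int)) (want : Int), Dom_zad21 t want → Pre_zad21 t want → Spec_zad21 t want (zad21 t want)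

-- ===== LEMMAS AND PROOFS =====

-- Reachability relation shared by both characterizations: RF n rows m s m' s' holds iff processing
-- `rows`, starting with used-column mask m and running sum s, can end with mask m' and sum s'
-- (each row is skipped or assigned a column k < n whose bit is still free).
inductive RF (n : Nat) : List (List Int) → Nat → Int → Nat → Int → Prop where
  | nil : ∀ m s, RF n [] m s m s
  | skip : ∀ row rest m s m' s', RF n rest m s m' s' → RF n (row :: rest) m s m' s'
  | pick : ∀ row rest m s m' s' k, k < n → m.testBit k = false →
      RF n rest (m ||| (1 <<< k)) (s + row.getD k 0) m' s' → RF n (row :: rest) m s m' s'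

-- A's recursion with the dead `res` string dropped and the row suffix made explicit.
def specRek (want : Int) (n : Nat) : List (List Int) → Int → List Bool → Bool
  | [], s, _ => decide (s = want)
  | row :: rest, s, tk =>
    if s = want then true
    else (List.range n).foldl (fun flag k =>
      let flag := if tk.getD k false then specRek want n rest (s + row.getD k 0) (tk.set k false) || flag else flag
      specRek want n rest s tk || flag) false

lemma foldl_or_any {α : Type} (g : α → Bool) : ∀ (l : List α) (b : Bool),
    l.foldl (fun fl k => fl || g k) b = (b || l.any g) := by
  intro l
  induction l with
  | nil => simp
  | cons a l ih => intro b; simp [List.foldl, ih, Bool.or_assoc]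

lemma body_eq (skip : Bool) (c : α → Bool) (p : α → Bool) :
    (fun (flag : Bool) (k : α) =>
      skip || (if c k then p k || flag else flag)) = (fun fl k => fl || (skip || (c k && p k))) := by
  funext fl k
  cases fl <;> cases h : c k <;> cases skip <;> simp_all


lemma mem_foldl_set {α β : Type} (F : List α → β → List α) (Q : β → α → Prop)
    (hF : ∀ S b x, x ∈ F S b ↔ x ∈ S ∨ Q b x) :
    ∀ (l : List β) (S : List α) (x : α), x ∈ l.foldl F S ↔ x ∈ S ∨ ∃ b ∈ l, Q b x := by
  intro l
  induction l with
  | nil => simp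
  | cons a l ih =>
    intro S x
    simp only [List.foldl_cons, ih, hF]
    constructor
    · rintro ((h | h) | ⟨b, hb, h⟩)
      · exact Or.inl h
      · exact Or.inr ⟨a, by simp, h⟩
      · exact Or.inr ⟨b, by simp [hb], h⟩
    · rintro (h | ⟨b, hb, h⟩)
      · exact Or.inl (Or.inl h)
      · rcases List.mem_cons.mp hb with rfl | hb
        · exact Or.inl (Or.inr h)
        · exact Or.inr ⟨b, hb, h⟩

lemma cond_testBit (m k : Nat) : (((m >>> k) &&& 1) == 0) = !(m.testBit k) := by
  simp [Nat.testBit, Nat.and_comm]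
  cases h : (1 &&& m >>> k) == 0 <;> simp_all [Nat.and_comm]

lemma mem_stepB (n : Nat) (row : List Int) (S : PySem.Set (Nat × Int)) (x : Nat × Int) :
    x ∈ stepB n row S ↔ x ∈ S ∨ ∃ st ∈ S, ∃ k, k < n ∧ st.1.testBit k = false ∧
      x = (st.1 ||| (1 <<< k), st.2 + row.getD k 0) := by
  have hinner : ∀ (st : Nat × Int) (new : List (Nat × Int)) (x : Nat × Int),
      x ∈ (List.range n).foldl (fun new k =>
        if ((st.1 >>> k) &&& 1) == 0 then
          PySem.Set.add new (st.1 ||| (1 <<< k), st.2 + row.getD k 0) else new) new ↔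
      x ∈ new ∨ ∃ k, k < n ∧ st.1.testBit k = false ∧
        x = (st.1 ||| (1 <<< k), st.2 + row.getD k 0) := by
    intro st new x
    rw [mem_foldl_set _
      (fun k x => st.1.testBit k = false ∧ x = (st.1 ||| (1 <<< k), st.2 + row.getD k 0))
      (fun S' k x' => by
        simp only [cond_testBit]
        by_cases hb : st.1.testBit k = false
        · simp [hb, PySem.Set.mem_add]
        · simp only [Bool.not_eq_false] at hb
          simp [hb])]
    simp [List.mem_range]
  exact mem_foldl_set _ (fun st x => ∃ k, k < n ∧ st.1.testBit k = false ∧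
      x = (st.1 ||| (1 <<< k), st.2 + row.getD k 0))
    (fun S' st x' => hinner st S' x') S S x

lemma RF_all_skip (n : Nat) : ∀ (rows : List (List Int)) (m : Nat) (s : Int), RF n rows m s m s := by
  intro rows
  induction rows with
  | nil => exact fun m s => RF.nil m s
  | cons row rest ih => exact fun m s => RF.skip row rest m s m s (ih m s)

lemma compat_update (n k : Nat) (tk : List Bool) (m : Nat) (htk : tk.length = n) (hk : k < n)
    (hcompat : ∀ j, j < n → tk.getD j false = !(m.testBit j)) :
    ∀ j, j < n → (tk.set k false).getD j false = !((m ||| (1 <<< k)).testBit j) := by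
  intro j hj
  rw [Nat.testBit_or, Nat.one_shiftLeft]
  rcases eq_or_ne j k with rfl | hne
  · simp [List.getD, List.getElem?_set_self (htk ▸ hj), Nat.testBit_two_pow_self]
  · have h2 : Nat.testBit (2 ^ k) j = false := Nat.testBit_two_pow_of_ne (Ne.symm hne)
    rw [h2]
    simp only [List.getD, List.getElem?_set_ne (Ne.symm hne)]
    simpa [List.getD] using hcompat j hj

lemma specRek_iff (want : Int) (n : Nat) : ∀ (rows : List (List Int)) (s : Int) (tk : List Bool) (m : Nat),
    rows.length ≤ n → tk.length = n → (∀ k, k < n → tk.getD k false = !(m.testBit k)) →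
    (specRek want n rows s tk = true ↔ ∃ m' s', RF n rows m s m' s' ∧ s' = want) := by
  intro rows
  induction rows with
  | nil =>
    intro s tk m _ _ _
    constructor
    · intro h; exact ⟨m, s, RF.nil m s, of_decide_eq_true h⟩
    · rintro ⟨m', s', hRF, rfl⟩; cases hRF; simp [specRek]
  | cons row rest ih =>
    intro s tk m hlen htk hcompat
    have hn : 0 < n := lt_of_lt_of_le (by simp) hlen
    have hlen' : rest.length ≤ n := le_trans (by simp) hlen
    simp only [specRek]
    by_cases hs : s = want
    · simp only [if_pos hs, true_iff]
      exact ⟨m, s, RF_all_skip n _ m s, hs⟩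
    rw [if_neg hs,
      body_eq (specRek want n rest s tk) (fun k => tk.getD k false)
        (fun k => specRek want n rest (s + row.getD k 0) (tk.set k false)),
      foldl_or_any]
    simp only [Bool.false_or, List.any_eq_true, List.mem_range, Bool.or_eq_true,
      Bool.and_eq_true]
    constructor
    · rintro ⟨k, hk, hsk | ⟨hc, hp⟩⟩
      · obtain ⟨m', s', h, hw⟩ := (ih s tk m hlen' htk hcompat).mp hsk
        exact ⟨m', s', RF.skip _ _ _ _ _ _ h, hw⟩
      · have hbit : m.testBit k = false := by
          have := hcompat k hk; rw [hc] at this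
          cases hb : m.testBit k
          · rfl
          · rw [hb] at this; simp at this
        obtain ⟨m', s', h, hw⟩ := (ih (s + row.getD k 0) (tk.set k false) (m ||| (1 <<< k))
          hlen' (by simp [htk]) (compat_update n k tk m htk hk hcompat)).mp hp
        exact ⟨m', s', RF.pick _ _ _ _ _ _ k hk hbit h, hw⟩
    · rintro ⟨m', s', hRF, hw⟩
      cases hRF with
      | skip _ _ _ _ _ _ h =>
        exact ⟨0, hn, Or.inl ((ih s tk m hlen' htk hcompat).mpr ⟨m', s', h, hw⟩)⟩
      | pick _ _ _ _ _ _ k hk hbit h =>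
        refine ⟨k, hk, Or.inr ⟨?_, ?_⟩⟩
        · rw [hcompat k hk, hbit]; rfl
        · exact (ih (s + row.getD k 0) (tk.set k false) (m ||| (1 <<< k))
            hlen' (by simp [htk]) (compat_update n k tk m htk hk hcompat)).mpr ⟨m', s', h, hw⟩

lemma rekA_eq_specRek (t : List (List Int)) (want : Int) :
    ∀ (d w_i : Nat) (s : Int) (tk : List Bool) (res : String), t.length - w_i = d →
      rekA t want t.length w_i s tk res = specRek want t.length (t.drop w_i) s tk := by
  intro d
  induction d with
  | zero =>
    intro w_i s tk res h
    rw [rekA, List.drop_eq_nil_of_le (by omega : t.length ≤ w_i)]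
    by_cases hs : s = want
    · simp [specRek, hs]
    · simp [specRek, hs, if_pos (by omega : t.length ≤ w_i)]
  | succ d ihd =>
    intro w_i s tk res h
    have hw : w_i < t.length := by omega
    have hd : t.length - (w_i + 1) = d := by omega
    rw [rekA, List.drop_eq_getElem_cons hw]
    simp only [specRek]
    by_cases hs : s = want
    · simp [hs]
    rw [if_neg hs, if_neg (by omega : ¬ t.length ≤ w_i), if_neg hs]
    congr 1
    funext flag k
    simp only [show ∀ s tk res, rekA t want t.length (w_i+1) s tk res
        = specRek want t.length (t.drop (w_i+1)) s tk from fun s tk res => ihd (w_i+1) s tk res hd,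
      show t.getD w_i [] = t[w_i] from by
        simp [List.getD, List.getElem?_eq_getElem hw]]

lemma foldB_mem (n : Nat) : ∀ (rows : List (List Int)) (init : PySem.Set (Nat × Int)) (x : Nat × Int),
    x ∈ rows.foldl (fun st row => stepB n row st) init ↔ ∃ p ∈ init, RF n rows p.1 p.2 x.1 x.2 := by
  intro rows
  induction rows with
  | nil =>
    intro init x
    obtain ⟨a, b⟩ := x
    constructor
    · intro h; exact ⟨(a, b), h, RF.nil a b⟩
    · rintro ⟨⟨c, d⟩, hp, hRF⟩; cases hRF; exact hp
  | cons row rest ih =>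
    intro init x
    simp only [List.foldl_cons, ih, mem_stepB]
    constructor
    · rintro ⟨p, hp | ⟨st, hst, k, hk, hbit, rfl⟩, hRF⟩
      · exact ⟨p, hp, RF.skip _ _ _ _ _ _ hRF⟩
      · exact ⟨st, hst, RF.pick _ _ _ _ _ _ k hk hbit hRF⟩
    · rintro ⟨⟨c, d⟩, hp, hRF⟩
      obtain ⟨a, b⟩ := x
      cases hRF with
      | skip _ _ _ _ _ _ h => exact ⟨(c, d), Or.inl hp, h⟩
      | pick _ _ _ _ _ _ k hk hbit h =>
        exact ⟨(c ||| (1 <<< k), d + row.getD k 0),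
          Or.inr ⟨(c, d), hp, k, hk, hbit, rfl⟩, h⟩

-- ===== VERDICT (by name: the statement is the Claim_ definition above) =====
theorem zad21_spec : Claim_equal_zad21 := by
  intro t want _ _
  show zad21 t want = zad21_alt t want
  have hcompat : ∀ k, k < t.length →
      (List.replicate t.length true).getD k false = !((0 : Nat).testBit k) := by
    intro k hk
    simp [List.getD, hk, Nat.zero_testBit]
  have hA : zad21 t want = true ↔ ∃ m' s', RF t.length t 0 0 m' s' ∧ s' = want := by
    unfold zad21
    rw [rekA_eq_specRek t want t.length 0 0 _ "" rfl, List.drop_zero]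
    exact specRek_iff want t.length t 0 _ 0 (le_refl _) (by simp) hcompat
  have hB : zad21_alt t want = true ↔ ∃ m' s', RF t.length t 0 0 m' s' ∧ s' = want := by
    unfold zad21_alt
    simp only [List.any_eq_true, foldB_mem, PySem.Set.mem_ofList, List.mem_singleton,
      beq_iff_eq, exists_eq_left, Prod.exists]
  exact Bool.eq_iff_iff.mpr (hA.trans hB.symm)
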